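-- pv_equiv track=rewrite | github.com/infomuscle/algorithms-hackerrank | amazon_1.py | countFamilyLogins
-- ===== SOURCE A (Python) =====
-- def countFamilyLogins(logins):
--     cnt = 0
--
--     converted = []
--     for login in logins:
--         converted.append(convert(login))
--
--     for i in range(len(logins)):
--         for j in range(i + 1, len(logins)):
--             if i == j:
--                 continue
--             if is_adjacent(logins[i], logins[j]) and (convert(logins[i]) == convert(logins[j])):
--                 cnt += 1
--
--     return cnt
--
-- def convert(login):
--     ordered = [ord(l) for l in login]
--     min_num = min(ordered)
--     converted = [int(ordered[i]) - min_num for i, num in enumerate(ordered)]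
--
--     return converted
--
-- def is_adjacent(login1, login2):
--     for i in range(len(login1)):
--         l1, l2 = ord(min(login1[i], login2[i])), ord(max(login1[i], login2[i]))
--         t1 = l1 + 1
--         if t1 > 122:
--             t1 -= 26
--         t2 = l1 - 1
--         if t2 < 97:
--             t2 += 26
--         if t1 != l2 and t2 != l2:
--             return False
--
--     return True
-- ===== SOURCE B (Python) =====
-- def countFamilyLogins(logins):
--     # Group strings by their normalized pattern once; only same-pattern pairs
--     # can count, so the inner scan runs over earlier same-pattern strings only.
--     def pattern(login):
--         ords = [ord(c) for c in login]
--         m = min(ords)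
--         return tuple(o - m for o in ords)
--
--     def adjacent(s, t):
--         for c1, c2 in zip(s, t):
--             lo, hi = (ord(c1), ord(c2)) if c1 <= c2 else (ord(c2), ord(c1))
--             up = lo + 1 if lo + 1 <= 122 else lo - 25
--             dn = lo - 1 if lo - 1 >= 97 else lo + 25
--             if hi != up and hi != dn:
--                 return False
--         return True
--
--     cnt = 0
--     seen = {}
--     for login in logins:
--         key = pattern(login)
--         for prev in seen.get(key, []):
--             if adjacent(prev, login):
--                 cnt += 1
--         seen.setdefault(key, []).append(login)
--     return cnt
-- ===== Notes on version B (the rewrite author's own statement) =====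
-- stated objective: alternative
-- what changed: B makes one pass that groups logins by their normalized pattern in a dict and scans only earlier same-pattern strings for adjacency, instead of A's all-pairs double loop that recomputes convert() for every pair; same worst case when all patterns coincide.
import Mathlib
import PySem

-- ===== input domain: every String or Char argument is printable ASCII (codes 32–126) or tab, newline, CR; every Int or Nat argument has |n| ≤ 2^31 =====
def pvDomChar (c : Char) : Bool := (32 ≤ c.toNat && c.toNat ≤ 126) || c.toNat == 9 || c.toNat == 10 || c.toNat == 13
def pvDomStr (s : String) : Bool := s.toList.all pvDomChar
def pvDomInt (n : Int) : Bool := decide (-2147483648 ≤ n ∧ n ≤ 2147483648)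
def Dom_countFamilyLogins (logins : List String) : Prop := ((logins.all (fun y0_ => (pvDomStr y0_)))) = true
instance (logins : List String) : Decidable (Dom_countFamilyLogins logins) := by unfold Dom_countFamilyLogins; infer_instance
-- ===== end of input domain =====

-- B groups the logins by their normalized pattern in one dict pass and scans only
-- earlier same-pattern strings for adjacency, instead of A's all-pairs double loop
-- that recomputes convert for every pair (same worst case when all patterns agree).


-- ===== PORT A =====
def pvConvertA (login : String) : List Int :=
  let ordered := login.toList.map (fun c => (c.toNat : Int))
  let min_num := (PySem.List.min? ordered (fun x => x)).getD 0  -- min([]) raises ValueError in Python: excluded by Pre_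
  (PySem.List.enumerate ordered).map (fun p => PySem.List.pyGetD ordered p.1 0 - min_num)

def pvIsAdjacentA (login1 login2 : String) : Bool :=
  -- Python returns False at the first failing position; the body is pure, so `all` is exact.
  (PySem.List.pyRange 0 (PySem.Str.len login1)).all (fun i =>
    let c1 := (PySem.Str.pyGet? login1 i).getD ' '
    let c2 := (PySem.Str.pyGet? login2 i).getD ' '  -- login2[i] raises IndexError when login2 is shorter: excluded by Pre_
    let l1 : Int := (min c1 c2).toNat
    let l2 : Int := (max c1 c2).toNat
    let t1 := if l1 + 1 > 122 then l1 + 1 - 26 else l1 + 1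
    let t2 := if l1 - 1 < 97 then l1 - 1 + 26 else l1 - 1
    !(t1 != l2 && t2 != l2))

def countFamilyLogins (logins : List String) : Int :=
  let converted := logins.foldl (fun acc login => acc ++ [pvConvertA login]) ([] : List (List Int))
  let _ := converted  -- built and never read, as in the Python
  (PySem.List.pyRange 0 (PySem.List.len logins)).foldl (fun cnt i =>
    (PySem.List.pyRange (i + 1) (PySem.List.len logins)).foldl (fun cnt j =>
      if i == j then cnt
      else if pvIsAdjacentA (PySem.List.pyGetD logins i "") (PySem.List.pyGetD logins j "")
              && (pvConvertA (PySem.List.pyGetD logins i "") == pvConvertA (PySem.List.pyGetD logins j ""))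
        then cnt + 1
        else cnt) cnt) 0

-- ===== PORT B =====
def pvPatternB (login : String) : List Int :=
  let ords := login.toList.map (fun c => (c.toNat : Int))
  let m := (PySem.List.min? ords (fun x => x)).getD 0  -- min([]) raises in Python too: excluded by Pre_
  ords.map (fun o => o - m)

def pvAdjacentB (s t : String) : Bool :=
  (s.toList.zip t.toList).all (fun p =>
    let lo : Int := (min p.1 p.2).toNat
    let hi : Int := (max p.1 p.2).toNat
    let up := if lo + 1 ≤ 122 then lo + 1 else lo - 25
    let dn := if 97 ≤ lo - 1 then lo - 1 else lo + 25
    hi == up || hi == dn)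

def countFamilyLogins_alt (logins : List String) : Int :=
  (logins.foldl
    (fun (st : Int × PySem.Dict (List Int) (List String)) login =>
      let key := pvPatternB login
      let prevs := st.2.getD key []
      (st.1 + (prevs.countP (fun prev => pvAdjacentB prev login) : Int),
       st.2.modify key [] (fun l => l ++ [login])))
    (0, PySem.Dict.empty)).1

-- ===== PRECONDITION & SPEC =====
-- per-position pass condition of A's is_adjacent, restated for Pre_ only
def pvPreAdjChar (c1 c2 : Char) : Bool :=
  let lo : Int := (min c1 c2).toNat
  let hi : Int := (max c1 c2).toNat
  (hi == (if lo + 1 > 122 then lo + 1 - 26 else lo + 1)) ||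
  (hi == (if lo - 1 < 97 then lo - 1 + 26 else lo - 1))

-- Pre_ excludes exactly the inputs where Python A raises: a list containing an empty
-- login (min() of an empty sequence in convert), or a pair i<j whose first string is
-- strictly longer and whose common prefix passes every adjacency check (is_adjacent
-- then indexes past the end of the second string: IndexError).
def Pre_countFamilyLogins (logins : List String) : Prop :=
  (∀ s ∈ logins, s.toList ≠ []) ∧
  ∀ j < logins.length, ∀ i < j,
    (logins.getD j "").toList.length < (logins.getD i "").toList.length →
    ∃ k < (logins.getD j "").toList.length,
      pvPreAdjChar ((logins.getD i "").toList.getD k ' ') ((logins.getD j "").toList.getD k ' ') = false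
instance (logins : List String) : Decidable (Pre_countFamilyLogins logins) := by
  unfold Pre_countFamilyLogins; infer_instance

def pvWitness_countFamilyLogins : List String := ["ab", "ba"]

def Spec_countFamilyLogins (logins : List String) (out : Int) : Prop := out = countFamilyLogins_alt logins
instance (logins : List String) (out : Int) : Decidable (Spec_countFamilyLogins logins out) := by
  unfold Spec_countFamilyLogins; infer_instance

-- ===== CLAIM (what is proved, stated in full; the proofs are below) =====
def Claim_equal_countFamilyLogins : Prop := ∀ (logins : List String), Dom_countFamilyLogins logins → Pre_countFamilyLogins logins → Spec_countFamilyLogins logins (countFamilyLogins logins)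

-- ===== LEMMAS AND PROOFS =====

-- the pair condition as A evaluates it / as B evaluates it
def pvQ (s t : String) : Bool := pvIsAdjacentA s t && (pvConvertA s == pvConvertA t)
def pvR (s t : String) : Bool := (pvPatternB s == pvPatternB t) && pvAdjacentB s t

lemma pvEnumMap (xs : List Int) (m : Int) :
    (PySem.List.enumerate xs).map (fun p => PySem.List.pyGetD xs p.1 0 - m) = xs.map (fun o => o - m) := by
  rw [PySem.List.enumerate_eq_map_pyRange xs 0, List.map_map]
  have hc : ((fun p : Int × Int => PySem.List.pyGetD xs p.1 0 - m) ∘ (fun j => (j, PySem.List.pyGetD xs j 0)))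
      = (fun x => x - m) ∘ (fun j => PySem.List.pyGetD xs j 0) := by
    funext j; rfl
  rw [hc, ← List.map_map, PySem.List.map_pyGetD_pyRange_zero]

lemma pvConvertA_eq_pattern (s : String) : pvConvertA s = pvPatternB s := by
  unfold pvConvertA pvPatternB
  exact pvEnumMap _ _

lemma pvPattern_length (s : String) : (pvPatternB s).length = s.toList.length := by
  simp [pvPatternB]

lemma pvAdjBody_eq (c1 c2 : Char) :
    (let l1 : Int := (min c1 c2).toNat
     let l2 : Int := (max c1 c2).toNat
     let t1 := if l1 + 1 > 122 then l1 + 1 - 26 else l1 + 1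
     let t2 := if l1 - 1 < 97 then l1 - 1 + 26 else l1 - 1
     !(t1 != l2 && t2 != l2)) =
    (let lo : Int := (min c1 c2).toNat
     let hi : Int := (max c1 c2).toNat
     let up := if lo + 1 ≤ 122 then lo + 1 else lo - 25
     let dn := if 97 ≤ lo - 1 then lo - 1 else lo + 25
     (hi == up || hi == dn)) := by
  simp only [gt_iff_lt, bne, Bool.not_and]
  set lo : Int := ((min c1 c2).toNat : Int)
  set hi : Int := ((max c1 c2).toNat : Int)
  split_ifs <;> (apply Bool.eq_iff_iff.mpr ; simp only [Bool.or_eq_true, beq_iff_eq, Bool.not_not] ; constructor <;> intro h <;> omega)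

lemma all_range_eq_zip (f : Char → Char → Bool) :
    ∀ (ls lt : List Char), ls.length = lt.length →
      ((List.range ls.length).all (fun k => f (ls[k]?.getD ' ') (lt[k]?.getD ' '))) =
      (ls.zip lt).all (fun p => f p.1 p.2) := by
  intro ls
  induction ls with
  | nil => intro lt h; simp
  | cons c ls ih =>
    intro lt h
    cases lt with
    | nil => simp at h
    | cons d lt =>
      have h' : ls.length = lt.length := by simpa using h
      simp only [List.length_cons, List.range_succ_eq_map, List.all_cons, List.all_map,
        List.zip_cons_cons]
      rw [show ((c :: ls)[0]?.getD ' ') = c from rfl, show ((d :: lt)[0]?.getD ' ') = d from rfl]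
      rw [Function.comp_def]
      simp only [List.getElem?_cons_succ]
      rw [ih lt h']

set_option maxRecDepth 8192 in
lemma pvIsAdjacentA_eq_adjB (s t : String) (h : s.toList.length = t.toList.length) :
    pvIsAdjacentA s t = pvAdjacentB s t := by
  unfold pvIsAdjacentA pvAdjacentB
  have hrange : PySem.List.pyRange 0 (PySem.Str.len s)
      = List.map (fun k : Nat => (k : Int)) (List.range s.toList.length) := by
    rw [PySem.Str.len_eq, PySem.List.pyRange_one]
    have hn : (((s.toList.length : Int)) - 0).toNat = s.toList.length := by omega
    rw [hn]
    exact List.map_congr_left (fun k _ => by omega)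
  rw [hrange, List.all_map]
  have hmid : ∀ (k : Nat),
      ((fun i =>
        let c1 := (PySem.Str.pyGet? s i).getD ' '
        let c2 := (PySem.Str.pyGet? t i).getD ' '
        let l1 : Int := (min c1 c2).toNat
        let l2 : Int := (max c1 c2).toNat
        let t1 := if l1 + 1 > 122 then l1 + 1 - 26 else l1 + 1
        let t2 := if l1 - 1 < 97 then l1 - 1 + 26 else l1 - 1
        !(t1 != l2 && t2 != l2)) ∘ (fun k : Nat => (k : Int))) k
      = (fun c1 c2 =>
          let lo : Int := (min c1 c2).toNat
          let hi : Int := (max c1 c2).toNat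
          let up := if lo + 1 ≤ 122 then lo + 1 else lo - 25
          let dn := if 97 ≤ lo - 1 then lo - 1 else lo + 25
          (hi == up || hi == dn)) (s.toList[k]?.getD ' ') (t.toList[k]?.getD ' ') := by
    intro k
    simp only [Function.comp_apply, PySem.Str.pyGet?_natCast]
    exact pvAdjBody_eq _ _
  exact (List.all_congr rfl hmid).trans (all_range_eq_zip (fun c1 c2 =>
    let lo : Int := (min c1 c2).toNat
    let hi : Int := (max c1 c2).toNat
    let up := if lo + 1 ≤ 122 then lo + 1 else lo - 25
    let dn := if 97 ≤ lo - 1 then lo - 1 else lo + 25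
    (hi == up || hi == dn)) s.toList t.toList h)

lemma pvQ_eq_pvR (s t : String) : pvQ s t = pvR s t := by
  unfold pvQ pvR
  rw [pvConvertA_eq_pattern s, pvConvertA_eq_pattern t]
  by_cases hp : pvPatternB s = pvPatternB t
  · have hlen : s.toList.length = t.toList.length := by
      rw [← pvPattern_length s, ← pvPattern_length t, hp]
    rw [pvIsAdjacentA_eq_adjB s t hlen, Bool.and_comm]
  · have : (pvPatternB s == pvPatternB t) = false := beq_eq_false_iff_ne.mpr hp
    simp [this]

-- A's double loop as a head recursion over the list
def pvSumHead : List String → Int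
  | [] => 0
  | x :: r => (r.countP (fun y => pvQ x y) : Int) + pvSumHead r

lemma inner_fold_eq (q : Int → Bool) (i a b : Int) (h : i < a) (c : Int) :
    (PySem.List.pyRange a b).foldl
      (fun cnt j => if i == j then cnt else if q j then cnt + 1 else cnt) c
    = c + ((PySem.List.pyRange a b).countP q : Int) := by
  rw [PySem.List.foldl_congr_mem _ _ (fun cnt j => if q j then cnt + 1 else cnt) c ?_]
  · exact PySem.List.foldl_count_if q _ c
  · intro acc j hj
    have hji := (PySem.List.mem_pyRange_one.mp hj).1
    have hne : i ≠ j := by omega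
    simp [hne]

lemma sum_suffix (logins : List String) :
    ∀ (k a : Nat), a + k = logins.length →
      ((PySem.List.pyRange (a : Int) (PySem.List.len logins)).map (fun i =>
        (((PySem.List.pyRange (i + 1) (PySem.List.len logins)).countP (fun j =>
          pvQ (PySem.List.pyGetD logins i "") (PySem.List.pyGetD logins j ""))) : Int))).sum
      = pvSumHead (logins.drop a) := by
  intro k
  induction k with
  | zero =>
    intro a ha
    rw [PySem.List.pyRange_one_eq_nil (by simp; omega)]
    rw [List.drop_of_length_le (by omega)]
    simp [pvSumHead]
  | succ k ih =>
    intro a ha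
    have halt : a < logins.length := by omega
    rw [PySem.List.pyRange_one_cons (by simp; exact_mod_cast halt)]
    rw [List.map_cons, List.sum_cons]
    have hdrop : logins.drop a = logins[a] :: logins.drop (a + 1) :=
      List.drop_eq_getElem_cons halt
    have hcast : ((a : Int) + 1) = ((a + 1 : Nat) : Int) := by push_cast; ring
    have hrest := ih (a + 1) (by omega)
    rw [← hcast] at hrest
    rw [hrest]
    have hhead : ((PySem.List.pyRange ((a : Int) + 1) (PySem.List.len logins)).countP (fun j =>
        pvQ (PySem.List.pyGetD logins (a : Int) "") (PySem.List.pyGetD logins j "")) : Int)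
        = ((logins.drop (a + 1)).countP (fun y => pvQ logins[a] y) : Int) := by
      have hg : PySem.List.pyGetD logins (a : Int) "" = logins[a] := by
        rw [PySem.List.pyGetD_natCast]
        simp [List.getD_eq_getElem?_getD, halt]
      rw [hg]
      have hmap := PySem.List.map_pyGetD_pyRange logins "" (a := (a : Int) + 1) (by omega)
      have hts : (((a : Int) + 1)).toNat = a + 1 := by omega
      rw [hts] at hmap
      conv_rhs => rw [← hmap, List.countP_map]
      rfl
    rw [hhead, hdrop]
    rfl

lemma A_eq_sumHead (logins : List String) : countFamilyLogins logins = pvSumHead logins := by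
  unfold countFamilyLogins
  have hbody : (fun (cnt i : Int) =>
      (PySem.List.pyRange (i + 1) (PySem.List.len logins)).foldl (fun cnt j =>
        if i == j then cnt
        else if pvIsAdjacentA (PySem.List.pyGetD logins i "") (PySem.List.pyGetD logins j "")
                && (pvConvertA (PySem.List.pyGetD logins i "") == pvConvertA (PySem.List.pyGetD logins j ""))
          then cnt + 1 else cnt) cnt)
      = (fun (cnt i : Int) => cnt +
          (((PySem.List.pyRange (i + 1) (PySem.List.len logins)).countP (fun j =>
            pvQ (PySem.List.pyGetD logins i "") (PySem.List.pyGetD logins j ""))) : Int)) := by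
    funext cnt i
    exact inner_fold_eq _ i (i + 1) _ (by omega) cnt
  show (PySem.List.pyRange 0 (PySem.List.len logins)).foldl _ 0 = _
  rw [hbody, PySem.List.foldl_add]
  rw [show ((0 : Int) = ((0 : Nat) : Int)) from rfl]
  rw [sum_suffix logins logins.length 0 (by omega)]
  simp

-- B's fold: dict state and counter invariant
def pvDictOf (pre : List String) : PySem.Dict (List Int) (List String) :=
  pre.foldl (fun d s => d.modify (pvPatternB s) [] (fun l => l ++ [s])) PySem.Dict.empty

lemma pvDictOf_getD (pre : List String) (k : List Int) :
    (pvDictOf pre).getD k [] = pre.filter (fun s => pvPatternB s == k) := by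
  unfold pvDictOf
  have h2 := PySem.Dict.getD_foldl_modify_append (pre.map (fun s => (pvPatternB s, s)))
    (PySem.Dict.empty) k
  simp only [List.foldl_map] at h2
  rw [h2]
  simp [List.filter_map, List.map_map, Function.comp_def]

-- prefix-wise pair sum that B's fold computes
def pvG : List String → List String → Int
  | _, [] => 0
  | pre, x :: xs => ((pre.countP (fun p => pvR p x)) : Int) + pvG (pre ++ [x]) xs

lemma B_fold (xs : List String) : ∀ (pre : List String) (c : Int),
    (xs.foldl
      (fun (st : Int × PySem.Dict (List Int) (List String)) login =>
        let key := pvPatternB login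
        let prevs := st.2.getD key []
        (st.1 + (prevs.countP (fun prev => pvAdjacentB prev login) : Int),
         st.2.modify key [] (fun l => l ++ [login])))
      (c, pvDictOf pre)).1 = c + pvG pre xs := by
  induction xs with
  | nil => intro pre c; simp [pvG]
  | cons x xs ih =>
    intro pre c
    rw [List.foldl_cons]
    have hfun : (fun a => pvAdjacentB a x && (pvPatternB a == pvPatternB x))
        = (fun p => pvR p x) := by
      funext p; simp [pvR, Bool.and_comm]
    have hstep : (let key := pvPatternB x
        let prevs := (pvDictOf pre).getD key []
        ((c + (prevs.countP (fun prev => pvAdjacentB prev x) : Int),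
          (pvDictOf pre).modify key [] (fun l => l ++ [x])) : Int × PySem.Dict (List Int) (List String)))
        = (c + ((pre.countP (fun p => pvR p x)) : Int), pvDictOf (pre ++ [x])) := by
      simp only [Prod.mk.injEq]
      refine ⟨?_, ?_⟩
      · rw [pvDictOf_getD, List.countP_filter, hfun]
      · unfold pvDictOf
        rw [List.foldl_append]
        rfl
    rw [hstep, ih (pre ++ [x]) (c + ((pre.countP (fun p => pvR p x)) : Int))]
    rw [show pvG pre (x :: xs) = ((pre.countP (fun p => pvR p x)) : Int) + pvG (pre ++ [x]) xs from rfl]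
    ring

lemma G_eq_sumHead (xs : List String) : ∀ (pre : List String),
    pvG pre xs = (xs.map (fun x => ((pre.countP (fun p => pvQ p x)) : Int))).sum + pvSumHead xs := by
  induction xs with
  | nil => intro pre; simp [pvG, pvSumHead]
  | cons x xs ih =>
    intro pre
    rw [show pvG pre (x :: xs) = ((pre.countP (fun p => pvR p x)) : Int) + pvG (pre ++ [x]) xs from rfl]
    rw [ih (pre ++ [x])]
    have hR : (pre.countP (fun p => pvR p x)) = (pre.countP (fun p => pvQ p x)) := by
      congr 1; funext p; exact (pvQ_eq_pvR p x).symm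
    have hsum : (xs.map (fun y => (((pre ++ [x]).countP (fun p => pvQ p y)) : Int))).sum
        = (xs.map (fun y => ((pre.countP (fun p => pvQ p y)) : Int))).sum
          + ((xs.countP (fun y => pvQ x y)) : Int) := by
      have hone : ∀ y, (((pre ++ [x]).countP (fun p => pvQ p y)) : Int)
          = ((pre.countP (fun p => pvQ p y)) : Int) + (if pvQ x y then 1 else 0) := by
        intro y
        rw [List.countP_append]
        by_cases h : pvQ x y <;> simp [h]
      calc (xs.map (fun y => (((pre ++ [x]).countP (fun p => pvQ p y)) : Int))).sum
          = (xs.map (fun y => ((pre.countP (fun p => pvQ p y)) : Int) + (if pvQ x y then 1 else 0))).sum := by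
            congr 1; exact List.map_congr_left (fun y _ => hone y)
        _ = (xs.map (fun y => ((pre.countP (fun p => pvQ p y)) : Int))).sum
              + (xs.map (fun y => ((if pvQ x y then (1 : Int) else 0)))).sum := by
            rw [← List.sum_map_add]
        _ = (xs.map (fun y => ((pre.countP (fun p => pvQ p y)) : Int))).sum
              + ((xs.countP (fun y => pvQ x y)) : Int) := by
            rw [PySem.List.sum_map_ite_one_zero]
    rw [hR, hsum]
    rw [show pvSumHead (x :: xs) = ((xs.countP (fun y => pvQ x y)) : Int) + pvSumHead xs from rfl]
    rw [List.map_cons, List.sum_cons]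
    ring

lemma B_eq_sumHead (logins : List String) : countFamilyLogins_alt logins = pvSumHead logins := by
  unfold countFamilyLogins_alt
  rw [show (PySem.Dict.empty : PySem.Dict (List Int) (List String)) = pvDictOf [] from rfl]
  rw [B_fold logins [] 0, G_eq_sumHead logins []]
  simp

-- ===== VERDICT (by name: the statement is the Claim_ definition above) =====
theorem countFamilyLogins_spec : Claim_equal_countFamilyLogins := by
  intro logins _ _
  unfold Spec_countFamilyLogins
  rw [A_eq_sumHead, B_eq_sumHead]
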